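-- pv_equiv track=rewrite | github.com/XyzHuy/-DL-Fine-tuning-coding-model | data/solution/Solution2495.py | evenProduct
-- ===== SOURCE A (Python) =====
-- from typing import List
--
-- def evenProduct(nums: List[int]) -> int:
--     last_even_index = -1
--     count = 0
--
--     for i, num in enumerate(nums):
--         if num % 2 == 0:
--             last_even_index = i
--         count += last_even_index + 1
--
--     return count
-- ===== SOURCE B (Python) =====
-- from typing import List
--
-- def evenProduct(nums: List[int]) -> int:
--     n = len(nums)
--     evens = [i for i, num in enumerate(nums) if num % 2 == 0]
--     total = 0
--     for k, j in enumerate(evens):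
--         nxt = evens[k + 1] if k + 1 < len(evens) else n
--         total += (j + 1) * (nxt - j)
--     return total
-- ===== Notes on version B (the rewrite author's own statement) =====
-- stated objective: alternative
-- what changed: Instead of A's per-position running accumulator carrying last_even_index, B collects the even indices once and sums one closed-form segment contribution (j+1)*(next_even_or_n - j) per even index.
import Mathlib
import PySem

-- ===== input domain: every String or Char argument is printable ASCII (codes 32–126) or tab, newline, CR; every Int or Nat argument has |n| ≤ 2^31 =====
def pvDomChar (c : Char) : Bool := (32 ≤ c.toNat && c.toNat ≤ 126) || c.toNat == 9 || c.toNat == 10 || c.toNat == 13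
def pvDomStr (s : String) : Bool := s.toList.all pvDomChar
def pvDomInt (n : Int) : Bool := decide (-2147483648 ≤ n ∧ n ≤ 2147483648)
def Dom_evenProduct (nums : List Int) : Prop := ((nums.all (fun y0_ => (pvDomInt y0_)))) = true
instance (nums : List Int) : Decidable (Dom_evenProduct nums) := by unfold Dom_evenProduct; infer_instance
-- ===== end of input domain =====

-- B replaces A's per-position running accumulator by one pass collecting the even
-- indices and a closed-form segment contribution per even index (objective: alternative).

-- ===== PORT A =====
-- A's loop: state (last_even_index, count), one step per element.
def pvAGo : List Int → Int → Int → Int → Int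
  | [], _, _, c => c
  | x :: xs, i, l, c =>
    let l' := if PySem.Int.mod x 2 == 0 then i else l
    pvAGo xs (i + 1) l' (c + l' + 1)

def evenProduct (nums : List Int) : Int := pvAGo nums 0 (-1) 0

-- ===== PORT B =====
-- Source B's comprehension: indices i with nums[i] % 2 == 0.
def pvEvens : List Int → Int → List Int
  | [], _ => []
  | x :: xs, i =>
    if PySem.Int.mod x 2 == 0 then i :: pvEvens xs (i + 1) else pvEvens xs (i + 1)

-- Source B's loop over evens: each even index j contributes (j+1)*(next even index or n - j).
def pvBGo : List Int → Int → Int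
  | [], _ => 0
  | [j], n => (j + 1) * (n - j)
  | j :: j2 :: rest, n => (j + 1) * (j2 - j) + pvBGo (j2 :: rest) n

def evenProduct_alt (nums : List Int) : Int := pvBGo (pvEvens nums 0) (nums.length : Int)

-- ===== PRECONDITION & SPEC =====
def Spec_evenProduct (nums : List Int) (out : Int) : Prop := out = evenProduct_alt nums
instance (nums : List Int) (out : Int) : Decidable (Spec_evenProduct nums out) := by unfold Spec_evenProduct; infer_instance

-- ===== CLAIM (what is proved, stated in full; the proofs are below) =====
def Claim_equal_evenProduct : Prop := ∀ (nums : List Int), Dom_evenProduct nums → Spec_evenProduct nums (evenProduct nums)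

-- ===== LEMMAS AND PROOFS =====

lemma pvBGo_cons (j : Int) (E : List Int) (n : Int) :
    pvBGo (j :: E) n = (j + 1) * (E.headD n - j) + pvBGo E n := by
  cases E with
  | nil => simp [pvBGo]
  | cons j2 rest => simp [pvBGo]

lemma pvKey (xs : List Int) : ∀ (i l c : Int),
    pvAGo xs i l c =
      c + (l + 1) * ((pvEvens xs i).headD (i + (xs.length : Int)) - i)
        + pvBGo (pvEvens xs i) (i + (xs.length : Int)) := by
  induction xs with
  | nil => intro i l c; simp [pvAGo, pvEvens, pvBGo]
  | cons x xs ih =>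
    intro i l c
    by_cases h : PySem.Int.mod x 2 == 0
    · simp only [pvAGo, pvEvens, h, if_pos]
      rw [ih (i + 1) i (c + i + 1), pvBGo_cons]
      simp only [List.headD, List.length_cons]
      push_cast
      ring_nf
    · simp only [pvAGo, pvEvens, h, if_neg, Bool.false_eq_true, not_false_iff]
      rw [ih (i + 1) l (c + l + 1)]
      have hn : (i + 1) + (xs.length : Int) = i + ((xs.length : Int) + 1) := by ring
      simp only [List.length_cons]
      push_cast
      rw [hn]
      ring

-- ===== VERDICT (by name: the statement is the Claim_ definition above) =====
theorem evenProduct_spec : Claim_equal_evenProduct := by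
  intro nums _
  unfold Spec_evenProduct evenProduct evenProduct_alt
  rw [pvKey nums 0 (-1) 0]
  simp
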